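-- pv_equiv track=rewrite | github.com/seungh0/programmers-algorithm | 20210402/148.py | solution
-- ===== SOURCE A (Python) =====
-- def solution(logs):
--     letters, digits = [], []
--     for log in logs:
--         if log.split()[1].isdigit():
--             digits.append(log)
--         else:
--             letters.append(log)
--
--     letters.sort(key=lambda x: (x.split()[1], x.split()[0]))
--     return letters + digits
-- ===== SOURCE B (Python) =====
-- def solution(logs):
--     def key(log):
--         parts = log.split()
--         if parts[1].isdigit():
--             return (1, "", "")
--         return (0, parts[1], parts[0])
--     return sorted(logs, key=key)
-- ===== Notes on version B (the rewrite author's own statement) =====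
-- stated objective: idiomatic
-- what changed: Replaces A's explicit partition loop into two lists followed by sorting the letter list and concatenating, with a single stable sorted() call whose tuple key (1,'','') for digit-logs and (0, second token, first token) for letter-logs does the classification and ordering at once.
import Mathlib
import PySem

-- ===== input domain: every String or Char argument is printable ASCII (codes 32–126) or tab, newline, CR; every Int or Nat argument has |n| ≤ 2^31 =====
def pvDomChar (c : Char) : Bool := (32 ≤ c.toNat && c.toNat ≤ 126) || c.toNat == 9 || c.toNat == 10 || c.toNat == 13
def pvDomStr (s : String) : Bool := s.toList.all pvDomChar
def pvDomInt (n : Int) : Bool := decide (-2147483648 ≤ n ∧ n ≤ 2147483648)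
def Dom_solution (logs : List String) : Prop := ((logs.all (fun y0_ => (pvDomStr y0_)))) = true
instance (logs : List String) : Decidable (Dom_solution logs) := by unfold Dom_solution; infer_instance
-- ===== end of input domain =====

-- B replaces A's partition-then-sort-then-concatenate with a single stable sort under a
-- classifying tuple key (idiomatic one-call decomposition; no speed claim).

-- ===== PORT A =====
def solution (logs : List String) : List String :=
  let part := logs.foldl
    (fun (p : List String × List String) log =>
      if PySem.Str.strIsdigit (PySem.List.pyGetD (PySem.Str.split₀ log) 1 "") then
        (p.1, p.2 ++ [log])
      else
        (p.1 ++ [log], p.2))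
    ([], [])
  PySem.List.sorted2 part.1
    (fun x => PySem.List.pyGetD (PySem.Str.split₀ x) 1 "")
    (fun x => PySem.List.pyGetD (PySem.Str.split₀ x) 0 "") ++ part.2

-- ===== PORT B =====
-- key(log): (1, "", "") for digit-logs, (0, second token, first token) for letter-logs;
-- Lex models Python's lexicographic tuple comparison.
def solKeyP (log : String) : Int × Lex (String × String) :=
  let parts := PySem.Str.split₀ log
  if PySem.Str.strIsdigit (PySem.List.pyGetD parts 1 "") then (1, toLex ("", ""))
  else (0, toLex (PySem.List.pyGetD parts 1 "", PySem.List.pyGetD parts 0 ""))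

def solKey (log : String) : Lex (Int × Lex (String × String)) := toLex (solKeyP log)

def solution_alt (logs : List String) : List String :=
  PySem.List.sorted logs solKey

-- ===== PRECONDITION & SPEC =====
-- Pre_ excludes exactly the inputs where Python A raises IndexError: a log with fewer
-- than two whitespace-separated tokens makes log.split()[1] raise.
def Pre_solution (logs : List String) : Prop :=
  ∀ log ∈ logs, 2 ≤ (PySem.Str.split₀ log).length
instance (logs : List String) : Decidable (Pre_solution logs) := by unfold Pre_solution; infer_instance

def pvWitness_solution : List String :=
  ["dig1 8 1 5 1", "let1 art can", "dig2 3 6", "let2 own kit dig", "let3 art zero"]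

def Spec_solution (logs : List String) (out : List String) : Prop := out = solution_alt logs
instance (logs : List String) (out : List String) : Decidable (Spec_solution logs out) := by unfold Spec_solution; infer_instance

-- ===== CLAIM (what is proved, stated in full; the proofs are below) =====
def Claim_equal_solution : Prop := ∀ (logs : List String), Dom_solution logs → Pre_solution logs → Spec_solution logs (solution logs)

-- ===== LEMMAS AND PROOFS =====

-- second token of a log (the total form used by both ports)
def pvTok1 (x : String) : String := PySem.List.pyGetD (PySem.Str.split₀ x) 1 ""
def pvTok0 (x : String) : String := PySem.List.pyGetD (PySem.Str.split₀ x) 0 ""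
def pvIsDig (x : String) : Bool := PySem.Str.strIsdigit (pvTok1 x)

lemma solKey_eq (x : String) :
    solKey x = if pvIsDig x then toLex ((1 : Int), toLex ("", ""))
               else toLex (0, toLex (pvTok1 x, pvTok0 x)) := by
  simp only [solKey, solKeyP, pvIsDig, pvTok1, pvTok0, apply_ite toLex]

-- inserting past a suffix every element of which the new element must precede
lemma insertBy_append_of_before {α : Type} (bef : α → α → Bool) (x : α)
    (SL D : List α) (hD : ∀ y ∈ D, bef x y = true) :
    PySem.List.insertBy bef x (SL ++ D) = PySem.List.insertBy bef x SL ++ D := by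
  induction SL with
  | nil =>
    cases D with
    | nil => rfl
    | cons d D' => simp [PySem.List.insertBy, hD d (by simp)]
  | cons s SL' ih =>
    by_cases h : bef x s = true
    · simp [PySem.List.insertBy, h]
    · simp [PySem.List.insertBy, h, ih]

lemma insertBy_congr_mem {α : Type} (bef bef' : α → α → Bool) (x : α) (ys : List α)
    (h : ∀ y ∈ ys, bef x y = bef' x y) :
    PySem.List.insertBy bef x ys = PySem.List.insertBy bef' x ys := by
  induction ys with
  | nil => rfl
  | cons y ys' ih =>
    have hy := h y (by simp)
    by_cases hb : bef x y = true
    · simp [PySem.List.insertBy, hb, hy ▸ hb]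
    · have hb' : bef' x y = false := by rw [← hy]; simpa using hb
      simp [PySem.List.insertBy, hb, hb', ih (fun z hz => h z (by simp [hz]))]

-- the comparison B's sort uses
def pvBefB (a b : String) : Bool := decide (solKey a < solKey b)
-- the comparison A's letter sort uses
def pvBefA (a b : String) : Bool :=
  decide (pvTok1 a < pvTok1 b) || (!decide (pvTok1 b < pvTok1 a) && decide (pvTok0 a < pvTok0 b))

lemma pvBefB_digit_left (x y : String) (hx : pvIsDig x = true) : pvBefB x y = false := by
  simp only [pvBefB, solKey_eq, hx, if_true, decide_eq_false_iff_not]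
  by_cases hy : pvIsDig y = true
  · simp [hy]
  · simp only [hy]
    simp only [Bool.not_eq_true] at hy
    simp [Prod.Lex.toLex_lt_toLex]

lemma pvBefB_letter_digit (x y : String) (hx : pvIsDig x = false) (hy : pvIsDig y = true) :
    pvBefB x y = true := by
  simp [pvBefB, solKey_eq, hx, hy, Prod.Lex.toLex_lt_toLex]

lemma pvBefB_letter_letter (x y : String) (hx : pvIsDig x = false) (hy : pvIsDig y = false) :
    pvBefB x y = pvBefA x y := by
  simp only [pvBefB, pvBefA, solKey_eq, hx, hy]
  rcases lt_trichotomy (pvTok1 x) (pvTok1 y) with h | h | h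
  · simp [Prod.Lex.toLex_lt_toLex, h, not_lt.mpr (le_of_lt h)]
  · simp [Prod.Lex.toLex_lt_toLex, h]
  · simp [Prod.Lex.toLex_lt_toLex, not_lt.mpr (le_of_lt h), h, ne_of_gt h]

-- the heart: one stable sort under solKey = (stable sort of the letter-logs) ++ digit-logs
lemma sorted_solKey_split (logs : List String) :
    PySem.List.sorted logs solKey
      = PySem.List.sorted2 (logs.filter (fun x => !pvIsDig x)) pvTok1 pvTok0
        ++ logs.filter (fun x => pvIsDig x) := by
  induction logs using List.reverseRecOn with
  | nil => rfl
  | append_singleton xs x ih =>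
    have hfoldB : ∀ (l : List String), PySem.List.sorted l solKey
        = l.foldl (fun acc z => PySem.List.insertBy pvBefB z acc) [] := fun _ => rfl
    have hfoldA : ∀ (l : List String), PySem.List.sorted2 l pvTok1 pvTok0
        = l.foldl (fun acc z => PySem.List.insertBy pvBefA z acc) [] := fun _ => rfl
    rw [hfoldB, List.foldl_append, ← hfoldB, ih]
    by_cases hx : pvIsDig x = true
    · simp only [List.foldl_cons, List.foldl_nil]
      rw [PySem.List.insertBy_of_forall_not_before pvBefB x _
        (fun y _ => pvBefB_digit_left x y hx)]
      simp [List.filter_append, hx, List.append_assoc]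
    · have hx' : pvIsDig x = false := by simpa using hx
      simp only [List.foldl_cons, List.foldl_nil]
      rw [insertBy_append_of_before pvBefB x _ _ (by
        intro y hy
        have : pvIsDig y = true := by simpa using List.of_mem_filter hy
        exact pvBefB_letter_digit x y hx' this)]
      rw [insertBy_congr_mem pvBefB pvBefA x _ (by
        intro y hy
        have hmem : y ∈ (xs.filter (fun z => !pvIsDig z)) :=
          (PySem.List.sorted2_perm ..).mem_iff.mp hy
        have : pvIsDig y = false := by simpa using List.of_mem_filter hmem
        exact pvBefB_letter_letter x y hx' this)]
      simp [List.filter_append, hx', hfoldA]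

-- A's partition loop is a pair of filters
lemma partition_eq_filters (logs : List String) :
    logs.foldl
      (fun (p : List String × List String) log =>
        if PySem.Str.strIsdigit (PySem.List.pyGetD (PySem.Str.split₀ log) 1 "") then
          (p.1, p.2 ++ [log])
        else
          (p.1 ++ [log], p.2)) ([], [])
      = (logs.filter (fun x => !pvIsDig x), logs.filter (fun x => pvIsDig x)) := by
  induction logs using List.reverseRecOn with
  | nil => rfl
  | append_singleton xs x ih =>
    rw [List.foldl_append, ih]
    by_cases hx : pvIsDig x = true
    · simp [pvIsDig, pvTok1, List.filter_append] at *
      simp [hx]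
    · have hx' : pvIsDig x = false := by simpa using hx
      simp [pvIsDig, pvTok1, List.filter_append] at *
      simp [hx']

-- ===== VERDICT (by name: the statement is the Claim_ definition above) =====
theorem solution_spec : Claim_equal_solution := by
  intro logs _ _
  unfold Spec_solution solution solution_alt
  rw [partition_eq_filters, sorted_solKey_split]
  rfl
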